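-- pv_equiv track=rewrite | github.com/rvosistemas/habi_test | segundo_ejercicio.py | ordenar_bloques
-- ===== SOURCE A (Python) =====
-- def ordenar_bloques(myArray):
--     bloques = []
--     bloque_actual = []
--
--     for num in myArray:
--         if num == 0:
--             if bloque_actual:
--                 bloques.append(sorted(bloque_actual))
--                 bloque_actual = []
--             else:
--                 bloques.append("X")
--         else:
--             bloque_actual.append(num)
--
--     if bloque_actual:
--         bloques.append(sorted(bloque_actual))
--
--     resultado = " ".join(["".join(map(str, bloque)) if bloque != "X" else "X" for bloque in bloques])
--     return resultado
-- ===== SOURCE B (Python) =====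
-- def ordenar_bloques(myArray):
--     # Run-based scan: emit one token per zero / per maximal non-zero run,
--     # skipping the zero that terminates a run (it only flushes the block).
--     tokens = []
--     i, n = 0, len(myArray)
--     while i < n:
--         if myArray[i] == 0:
--             tokens.append("X")
--             i += 1
--         else:
--             j = i
--             while j < n and myArray[j] != 0:
--                 j += 1
--             tokens.append("".join(map(str, sorted(myArray[i:j]))))
--             i = j + 1  # skip the flushing zero (harmless if j == n)
--     return " ".join(tokens)
-- ===== Notes on version B (the rewrite author's own statement) =====
-- stated objective: alternative
-- what changed: Replaces A's accumulator fold (pending-block list mutated element by element and flushed at zeros) with a run-based index scan that emits one token per maximal non-zero run or lone zero, skipping the zero that terminates a run.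
import Mathlib
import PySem

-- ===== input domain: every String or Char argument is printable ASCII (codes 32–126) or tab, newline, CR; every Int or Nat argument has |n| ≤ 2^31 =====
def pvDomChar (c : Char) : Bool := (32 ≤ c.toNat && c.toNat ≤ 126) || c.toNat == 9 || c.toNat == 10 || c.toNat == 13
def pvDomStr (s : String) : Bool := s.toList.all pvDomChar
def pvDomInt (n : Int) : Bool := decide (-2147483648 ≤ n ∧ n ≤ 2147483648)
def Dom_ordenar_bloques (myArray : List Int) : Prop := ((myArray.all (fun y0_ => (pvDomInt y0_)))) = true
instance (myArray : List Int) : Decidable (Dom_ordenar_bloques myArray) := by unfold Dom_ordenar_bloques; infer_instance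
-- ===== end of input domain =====

-- B replaces A's accumulator fold with a run-based scan (one token per maximal non-zero run or lone zero); alternative decomposition, same cost.

-- ===== PORT A =====
-- state: (bloques, bloque_actual); a block entry is `some l` (a sorted block) or `none` ("X")
def obStep (st : List (Option (List Int)) × List Int) (num : Int) : List (Option (List Int)) × List Int :=
  if num = 0 then
    if st.2 ≠ [] then (st.1 ++ [some (PySem.List.sorted st.2 (fun x => x))], [])
    else (st.1 ++ [none], st.2)
  else (st.1, st.2 ++ [num])

def obRender (b : Option (List Int)) : String :=
  match b with
  | some l => PySem.Str.join "" (l.map PySem.Int.toStr)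
  | none => "X"

def ordenar_bloques (myArray : List Int) : String :=
  let st := myArray.foldl obStep ([], [])
  let bloques := if st.2 ≠ [] then st.1 ++ [some (PySem.List.sorted st.2 (fun x => x))] else st.1
  PySem.Str.join " " (bloques.map obRender)

-- ===== PORT B =====
-- run-based scan: the index pair (i, j) of Source B becomes takeWhile/dropWhile on the suffix
def obTokens : List Int → List String
  | [] => []
  | x :: xs =>
    if x = 0 then "X" :: obTokens xs
    else
      PySem.Str.join "" ((PySem.List.sorted (List.takeWhile (fun y => decide (y ≠ 0)) (x :: xs)) (fun x => x)).map PySem.Int.toStr)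
        :: obTokens ((List.dropWhile (fun y => decide (y ≠ 0)) (x :: xs)).drop 1)
termination_by xs => xs.length
decreasing_by
  · simp
  · have h1 := List.length_dropWhile_le (fun y => decide (y ≠ 0)) (x :: xs)
    simp only [List.length_drop, List.length_cons] at *
    omega

def ordenar_bloques_alt (myArray : List Int) : String :=
  PySem.Str.join " " (obTokens myArray)

-- ===== PRECONDITION & SPEC =====
def Spec_ordenar_bloques (myArray : List Int) (out : String) : Prop := out = ordenar_bloques_alt myArray
instance (myArray : List Int) (out : String) : Decidable (Spec_ordenar_bloques myArray out) := by unfold Spec_ordenar_bloques; infer_instance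

-- ===== CLAIM (what is proved, stated in full; the proofs are below) =====
def Claim_equal_ordenar_bloques : Prop := ∀ (myArray : List Int), Dom_ordenar_bloques myArray → Spec_ordenar_bloques myArray (ordenar_bloques myArray)

-- ===== LEMMAS AND PROOFS =====

-- A's block list, read off its fold: pending block `actual`, remaining input `xs`
def obG : List Int → List Int → List (Option (List Int))
  | actual, [] => if actual ≠ [] then [some (PySem.List.sorted actual (fun x => x))] else []
  | actual, n :: xs =>
    if n = 0 then
      if actual ≠ [] then some (PySem.List.sorted actual (fun x => x)) :: obG [] xs
      else none :: obG [] xs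
    else obG (actual ++ [n]) xs

theorem obG_foldl (xs : List Int) : ∀ (b : List (Option (List Int))) (a : List Int),
    (if (xs.foldl obStep (b, a)).2 ≠ [] then
       (xs.foldl obStep (b, a)).1 ++ [some (PySem.List.sorted (xs.foldl obStep (b, a)).2 (fun x => x))]
     else (xs.foldl obStep (b, a)).1)
    = b ++ obG a xs := by
  induction xs with
  | nil => intro b a; by_cases h : a = [] <;> simp [obG, h]
  | cons n xs ih =>
    intro b a
    simp only [List.foldl_cons, obStep, obG]
    by_cases hn : n = 0
    · by_cases ha : a = [] <;> simp [hn, ha, ih, List.append_assoc]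
    · simp [hn, ih]

theorem obG_run (xs : List Int) : ∀ (actual : List Int), actual ≠ [] →
    obG actual xs
    = some (PySem.List.sorted (actual ++ List.takeWhile (fun y => decide (y ≠ 0)) xs) (fun x => x))
      :: obG [] ((List.dropWhile (fun y => decide (y ≠ 0)) xs).drop 1) := by
  induction xs with
  | nil => intro a ha; simp [obG, ha]
  | cons n xs ih =>
    intro a ha
    by_cases hn : n = 0
    · simp [obG, hn, ha, List.takeWhile, List.dropWhile]
    · have := ih (a ++ [n]) (by intro h; cases a <;> simp_all)
      simp only [obG, if_neg hn]
      simp [this, List.takeWhile, List.dropWhile, hn]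

theorem obG_tokens (xs : List Int) : (obG [] xs).map obRender = obTokens xs := by
  induction xs using obTokens.induct with
  | case1 => simp [obG, obTokens]
  | case2 xs ih => simp [obG, obTokens, obRender, ih]
  | case3 x xs hx ih =>
    have hrun := obG_run xs [x] (by simp)
    simp only [obG, if_neg hx, List.nil_append]
    rw [hrun]
    simp only [List.map_cons]
    simp only [obTokens, obRender, List.takeWhile, List.dropWhile, hx]
    have hd : decide (x ≠ 0) = true := by simp [hx]
    rw [List.dropWhile_cons] at ih
    simp only [hd, if_pos, if_false, List.singleton_append] at ih ⊢
    simpa [decide_not, List.drop_one] using ih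

-- ===== VERDICT (by name: the statement is the Claim_ definition above) =====
theorem ordenar_bloques_spec : Claim_equal_ordenar_bloques := by
  intro myArray _
  show ordenar_bloques myArray = ordenar_bloques_alt myArray
  have h := obG_foldl myArray [] []
  unfold ordenar_bloques ordenar_bloques_alt
  simp only [h, List.nil_append, obG_tokens]
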